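-- pv_equiv track=rewrite | github.com/Heroamit007/DSA- | Leetcode/3712secondvariant.py | sumDivisibleByK
-- ===== SOURCE A (Python) =====
-- def sumDivisibleByK(nums, k):
--     """
--     :type nums: List[int]
--     :type k: int
--     :rtype: int
--     """
--     freqNumber = {}
--     maxCount = 0
--     sum=0
--     for num in nums:
--         freqNumber[num] = freqNumber.get(num,0)+1
--         if freqNumber[num] % k == 0:
--             sum += num*freqNumber[num]
--             freqNumber[num]= 0
--     # for key,d in freqNumber.items():
--     #     if d%k==0:
--     #         sum+=key*d
--     return sum
-- ===== SOURCE B (Python) =====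
-- def sumDivisibleByK(nums, k):
--     freq = {}
--     for num in nums:
--         freq[num] = freq.get(num, 0) + 1
--     K = abs(k)
--     total = 0
--     for num, c in freq.items():
--         total += num * K * (c // K)
--     return total
-- ===== Notes on version B (the rewrite author's own statement) =====
-- stated objective: simpler
-- what changed: Replaces A's interleaved single pass (increment, test running count % k, reset the counter slot) by a count-everything-then-reduce shape: build the full frequency map in one plain pass, then sum num * abs(k) * (count // abs(k)) over the distinct entries in closed form.
import Mathlib
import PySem

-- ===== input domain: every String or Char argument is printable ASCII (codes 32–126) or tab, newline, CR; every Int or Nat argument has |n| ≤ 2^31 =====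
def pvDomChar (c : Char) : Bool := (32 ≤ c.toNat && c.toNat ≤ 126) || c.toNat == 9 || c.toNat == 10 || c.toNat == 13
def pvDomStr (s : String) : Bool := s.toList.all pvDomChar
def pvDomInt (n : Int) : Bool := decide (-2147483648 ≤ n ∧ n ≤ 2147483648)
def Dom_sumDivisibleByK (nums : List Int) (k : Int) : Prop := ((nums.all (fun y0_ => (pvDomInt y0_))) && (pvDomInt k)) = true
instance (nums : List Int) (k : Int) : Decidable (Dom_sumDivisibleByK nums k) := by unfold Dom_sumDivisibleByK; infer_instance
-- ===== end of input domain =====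

-- B replaces A's interleaved count-test-reset pass by "build the full frequency map, then reduce each entry in closed form" (objective: simpler).

-- ===== PORT A =====
-- state (freqNumber, sum); freqNumber[num] = freqNumber.get(num,0)+1; if freqNumber[num] % k == 0: sum += num*freqNumber[num]; freqNumber[num] = 0
def sumDivisibleByK (nums : List Int) (k : Int) : Int :=
  (nums.foldl (fun (st : PySem.Dict Int Int × Int) num =>
      let v := st.1.getD num 0 + 1
      let d := st.1.insert num v
      if PySem.Int.mod v k = 0 then (d.insert num 0, st.2 + num * v)
      else (d, st.2))
    (PySem.Dict.empty, 0)).2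

-- ===== PORT B =====
-- freq built first in one pass; then total += num * abs(k) * (c // abs(k)) over freq.items()
def sumDivisibleByK_alt (nums : List Int) (k : Int) : Int :=
  let freq := nums.foldl (fun (d : PySem.Dict Int Int) num => d.insert num (d.getD num 0 + 1)) PySem.Dict.empty
  let K : Int := |k|
  freq.items.foldl (fun total p => total + p.1 * K * PySem.Int.floordiv p.2 K) 0

-- ===== PRECONDITION & SPEC =====
-- Pre_ excludes only k = 0 with nonempty nums: there the Python A raises ZeroDivisionError (and B does too).
def Pre_sumDivisibleByK (nums : List Int) (k : Int) : Prop := nums = [] ∨ k ≠ 0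
instance (nums : List Int) (k : Int) : Decidable (Pre_sumDivisibleByK nums k) := by unfold Pre_sumDivisibleByK; infer_instance
def pvWitness_sumDivisibleByK : List Int × Int := ([1, 1, 2, 1, 2], 2)

def Spec_sumDivisibleByK (nums : List Int) (k : Int) (out : Int) : Prop := out = sumDivisibleByK_alt nums k
instance (nums : List Int) (k : Int) (out : Int) : Decidable (Spec_sumDivisibleByK nums k out) := by unfold Spec_sumDivisibleByK; infer_instance

-- ===== CLAIM (what is proved, stated in full; the proofs are below) =====
def Claim_equal_sumDivisibleByK : Prop := ∀ (nums : List Int) (k : Int), Dom_sumDivisibleByK nums k → Pre_sumDivisibleByK nums k → Spec_sumDivisibleByK nums k (sumDivisibleByK nums k)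

-- ===== LEMMAS AND PROOFS =====
-- pvG K p: the common value — over the distinct elements of p, x * K * (count of x in p / K)
def pvG (K : Int) (p : List Int) : Int :=
  ((PySem.Set.ofList p).map (fun x => x * K * ((p.count x : Int) / K))).sum

lemma pv_alt_eq_pvG (nums : List Int) (k : Int) (hk : k ≠ 0) :
    sumDivisibleByK_alt nums k = pvG |k| nums := by
  have hK : 0 < |k| := abs_pos.mpr hk
  rw [show sumDivisibleByK_alt nums k
      = ((PySem.Dict.counter nums).items).foldl
          (fun total p => total + p.1 * |k| * PySem.Int.floordiv p.2 |k|) 0 from rfl]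
  rw [PySem.Dict.items_counter, PySem.List.foldl_add, List.map_map]
  unfold pvG
  simp only [zero_add]
  congr 1
  apply List.map_congr_left
  intro x hx
  simp [Function.comp, PySem.Int.floordiv_eq_ediv_of_pos hK]

lemma pv_dvd_succ_iff (c K : Int) (hK : 0 < K) : K ∣ (c + 1) ↔ c % K + 1 = K := by
  rw [Int.dvd_iff_emod_eq_zero, Int.add_emod]
  rcases eq_or_lt_of_le (by omega : (1:Int) ≤ K) with h1 | h1
  · rw [← h1]; simp
  · have h1m : (1:Int) % K = 1 := Int.emod_eq_of_lt (by omega) h1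
    have hr0 := Int.emod_nonneg c hK.ne'
    have hrK := Int.emod_lt_of_pos c hK
    rw [h1m]
    constructor
    · intro h
      by_contra hne
      rw [Int.emod_eq_of_lt (by omega) (by omega)] at h
      omega
    · intro h; rw [h]; simp

lemma pv_dvd_mod_succ_iff (c K : Int) (hK : 0 < K) : K ∣ (c % K + 1) ↔ c % K + 1 = K := by
  have hr0 := Int.emod_nonneg c hK.ne'
  have hrK := Int.emod_lt_of_pos c hK
  constructor
  · intro h; exact le_antisymm (by omega) (Int.le_of_dvd (by omega) h)
  · intro h; rw [h]

lemma pv_divmod_succ_roll (c K : Int) (hK : 0 < K) (h : c % K + 1 = K) :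
    (c+1)/K = c/K + 1 ∧ (c+1) % K = 0 := by
  apply (Int.ediv_emod_unique hK).mpr
  have h1 := Int.mul_ediv_add_emod c K
  have h2 : K * (c / K + 1) = K * (c / K) + K := by ring
  omega

lemma pv_divmod_succ_keep (c K : Int) (hK : 0 < K) (h : c % K + 1 < K) :
    (c+1)/K = c/K ∧ (c+1) % K = c % K + 1 := by
  apply (Int.ediv_emod_unique hK).mpr
  have h1 := Int.mul_ediv_add_emod c K
  have h2 := Int.emod_nonneg c hK.ne'
  omega

lemma pv_sum_map_update {S : List Int} (hnd : S.Nodup) {a : Int} (ha : a ∈ S)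
    (f f' : Int → Int) (h : ∀ x ∈ S, x ≠ a → f' x = f x) :
    (S.map f').sum = (S.map f).sum + (f' a - f a) := by
  induction S with
  | nil => cases ha
  | cons y t ih =>
    simp only [List.map_cons, List.sum_cons]
    rcases List.mem_cons.mp ha with rfl | hat
    · have hall : ∀ x ∈ t, f' x = f x := by
        intro x hx
        exact h x (List.mem_cons_of_mem _ hx) (fun hxy => (List.nodup_cons.mp hnd).1 (hxy ▸ hx))
      rw [List.map_congr_left hall]; ring
    · have hya : y ≠ a := fun hya => (List.nodup_cons.mp hnd).1 (hya ▸ hat)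
      rw [h y (List.mem_cons_self) hya,
        ih (List.nodup_cons.mp hnd).2 hat (fun x hx hxa => h x (List.mem_cons_of_mem _ hx) hxa)]
      ring

lemma pvG_step (K : Int) (hK : 0 < K) (p : List Int) (a : Int) :
    pvG K (p ++ [a]) = pvG K p + (if K ∣ ((p.count a : Int) + 1) then a * K else 0) := by
  unfold pvG
  rw [PySem.Set.ofList_append_singleton]
  have hcnt_self : ((p ++ [a]).count a : Int) = (p.count a : Int) + 1 := by
    rw [List.count_append]; push_cast; simp
  have hcnt_ne : ∀ x : Int, x ≠ a → ((p ++ [a]).count x : Int) = (p.count x : Int) := by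
    intro x hx
    rw [List.count_append]
    have h0 : List.count x [a] = 0 := List.count_eq_zero.mpr (by simpa using hx)
    simp [h0]
  by_cases hmem : a ∈ PySem.Set.ofList p
  · rw [PySem.Set.add_of_mem hmem]
    rw [pv_sum_map_update (PySem.Set.nodup_ofList p) hmem
      (fun x => x * K * ((p.count x : Int) / K))
      (fun x => x * K * (((p ++ [a]).count x : Int) / K))
      (by intro x hx hxa; simp only [hcnt_ne x hxa])]
    simp only [hcnt_self]
    set c : Int := (p.count a : Int) with hc
    by_cases hdvd : K ∣ (c + 1)
    · have hmod := (pv_dvd_succ_iff c K hK).mp hdvd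
      obtain ⟨hdiv, -⟩ := pv_divmod_succ_roll c K hK hmod
      rw [hdiv, if_pos hdvd]; ring
    · have hne := (pv_dvd_succ_iff c K hK).not.mp hdvd
      have hrK := Int.emod_lt_of_pos c hK
      obtain ⟨hdiv, -⟩ := pv_divmod_succ_keep c K hK (by omega)
      rw [hdiv, if_neg hdvd]; ring
  · rw [PySem.Set.add_of_not_mem hmem]
    have hpa : p.count a = 0 := by
      rw [List.count_eq_zero]
      exact fun h => hmem ((PySem.Set.mem_ofList p a).mpr h)
    rw [List.map_append, List.sum_append]
    have hrest : List.map (fun x => x * K * (((p ++ [a]).count x : Int) / K)) (PySem.Set.ofList p)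
        = List.map (fun x => x * K * ((p.count x : Int) / K)) (PySem.Set.ofList p) := by
      apply List.map_congr_left
      intro x hx
      have hxa : x ≠ a := fun hxy => hmem (hxy ▸ hx)
      simp only [hcnt_ne x hxa]
    rw [hrest]
    simp only [List.map_cons, List.map_nil, List.sum_cons, List.sum_nil, hcnt_self, hpa]
    by_cases hone : K = 1
    · subst hone; simp
    · have h1 : ((0:Nat) + 1 : Int) / K = 0 := by
        apply Int.ediv_eq_zero_of_lt <;> omega
      have hnd : ¬ (K ∣ ((0:Nat) + 1 : Int)) := by
        intro hd
        have := Int.le_of_dvd (by omega) hd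
        omega
      rw [h1, if_neg hnd]
      ring

lemma pvA_loop (k : Int) (hk : k ≠ 0) (l : List Int) :
    ∀ (p : List Int) (d : PySem.Dict Int Int) (s : Int),
    (∀ x : Int, d.getD x 0 = (p.count x : Int) % |k|) → s = pvG |k| p →
    (l.foldl (fun (st : PySem.Dict Int Int × Int) num =>
        let v := st.1.getD num 0 + 1
        let d := st.1.insert num v
        if PySem.Int.mod v k = 0 then (d.insert num 0, st.2 + num * v)
        else (d, st.2)) (d, s)).2 = pvG |k| (p ++ l) := by
  have hK : 0 < |k| := abs_pos.mpr hk
  induction l with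
  | nil => intro p d s hd hs; simpa using hs
  | cons a t ih =>
    intro p d s hd hs
    simp only [List.foldl_cons]
    have happ : p ++ a :: t = (p ++ [a]) ++ t := by simp
    rw [happ]
    set c : Int := (p.count a : Int) with hc
    have hc0 : 0 ≤ c := Int.natCast_nonneg _
    have hr0 := Int.emod_nonneg c hK.ne'
    have hrK := Int.emod_lt_of_pos c hK
    have hcnt_self : ((p ++ [a]).count a : Int) = c + 1 := by
      rw [List.count_append]; push_cast; simp [hc]
    have hcnt_ne : ∀ x : Int, x ≠ a → ((p ++ [a]).count x : Int) = (p.count x : Int) := by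
      intro x hx
      rw [List.count_append]
      have h0 : List.count x [a] = 0 := List.count_eq_zero.mpr (by simpa using hx)
      simp [h0]
    have hcond : (PySem.Int.mod (d.getD a 0 + 1) k = 0) ↔ |k| ∣ (c + 1) := by
      rw [PySem.Int.mod_eq_zero_iff_dvd, hd a, ← abs_dvd,
        pv_dvd_mod_succ_iff c |k| hK, ← pv_dvd_succ_iff c |k| hK]
    by_cases hif : PySem.Int.mod (d.getD a 0 + 1) k = 0
    · have hdvd := hcond.mp hif
      have hmod := (pv_dvd_succ_iff c |k| hK).mp hdvd
      rw [if_pos hif, PySem.Dict.insert_insert_self]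
      apply ih
      · intro x
        by_cases hx : x = a
        · subst hx
          rw [PySem.Dict.getD_insert_self, hcnt_self]
          exact ((pv_divmod_succ_roll c |k| hK hmod).2).symm
        · rw [PySem.Dict.getD_insert_of_ne _ _ _ hx, hd x, hcnt_ne x hx]
      · rw [hd a, hmod, hs, pvG_step |k| hK p a, if_pos hdvd]
    · have hdvd := hcond.not.mp hif
      rw [if_neg hif]
      apply ih
      · intro x
        by_cases hx : x = a
        · subst hx
          rw [PySem.Dict.getD_insert_self, hd x, hcnt_self]
          have hne := (pv_dvd_succ_iff c |k| hK).not.mp hdvd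
          exact ((pv_divmod_succ_keep c |k| hK (by omega)).2).symm
        · rw [PySem.Dict.getD_insert_of_ne _ _ _ hx, hd x, hcnt_ne x hx]
      · rw [hs, pvG_step |k| hK p a, if_neg hdvd]; ring

-- ===== VERDICT (by name: the statement is the Claim_ definition above) =====
theorem sumDivisibleByK_spec : Claim_equal_sumDivisibleByK := by
  intro nums k _ hpre
  unfold Spec_sumDivisibleByK
  rcases hpre with rfl | hk
  · rfl
  · rw [pv_alt_eq_pvG nums k hk]
    unfold sumDivisibleByK
    have h := pvA_loop k hk nums [] PySem.Dict.empty 0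
      (by intro x; simp [PySem.Dict.getD, PySem.Dict.get?, PySem.Dict.empty]) rfl
    simpa using h
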